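-- pv_equiv track=rewrite | github.com/geomeza/assignment-problems | src/magic_square.py | is_currently_valid
-- ===== SOURCE A (Python) =====
-- def is_currently_valid(arr):
--     columns = []
--     for i in range(len(arr)):
--         columns.append([])
--         for j in range(len(arr[0])):
--             columns[i].append(arr[j][i])
--     for i in range(3):
--         if None in arr[i]:
--             continue
--         if sum(arr[i]) != 15:
--             return False
--     if None not in columns[0]:
--         if sum(columns[0]) != 15:
--             return False
--     if None not in columns[1]:
--         if sum(columns[1]) != 15:
--             return False
--     if None not in columns[2]:
--         if sum(columns[2]) != 15:
--             return False
--     if None not in [arr[0][0], arr[1][1], arr[2][2]]: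
--         if sum([arr[0][0], arr[1][1], arr[2][2]]) != 15:
--             return False
--     if None not in [arr[0][2], arr[1][1], arr[2][0]]:
--         if (arr[0][2] + arr[1][1] + arr[2][0]) != 15:
--             return False
--     return True
-- ===== SOURCE B (Python) =====
-- def is_currently_valid(arr):
--     # Scatter pass: walk the cells of the (possibly partially filled) 3x3 grid
--     # once, accumulating a running sum and a completeness flag for each of the
--     # 8 magic-square lines, then judge all lines at the end.
--     # Line ids: 0-2 rows, 3-5 columns, 6 main diagonal, 7 anti-diagonal.
--     sums = [0] * 8
--     complete = [True] * 8
--     for i, row in enumerate(arr[:3]):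
--         for j, v in enumerate(row[:3]):
--             lines = [i, 3 + j]
--             if i == j:
--                 lines.append(6)
--             if i + j == 2:
--                 lines.append(7)
--             for g in lines:
--                 if v is None:
--                     complete[g] = False
--                 else:
--                     sums[g] += v
--     return all(not complete[g] or sums[g] == 15 for g in range(8))
-- ===== Notes on version B (the rewrite author's own statement) =====
-- stated objective: alternative
-- what changed: B is a scatter pass: it walks the grid's cells once (clipped to the 3x3 board), accumulating a running sum plus a completeness flag for each of the 8 constraint lines, and judges all lines at the end, instead of A's gather approach of building the transpose and checking each row, column and diagonal with its own branch; …
import Mathlib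
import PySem

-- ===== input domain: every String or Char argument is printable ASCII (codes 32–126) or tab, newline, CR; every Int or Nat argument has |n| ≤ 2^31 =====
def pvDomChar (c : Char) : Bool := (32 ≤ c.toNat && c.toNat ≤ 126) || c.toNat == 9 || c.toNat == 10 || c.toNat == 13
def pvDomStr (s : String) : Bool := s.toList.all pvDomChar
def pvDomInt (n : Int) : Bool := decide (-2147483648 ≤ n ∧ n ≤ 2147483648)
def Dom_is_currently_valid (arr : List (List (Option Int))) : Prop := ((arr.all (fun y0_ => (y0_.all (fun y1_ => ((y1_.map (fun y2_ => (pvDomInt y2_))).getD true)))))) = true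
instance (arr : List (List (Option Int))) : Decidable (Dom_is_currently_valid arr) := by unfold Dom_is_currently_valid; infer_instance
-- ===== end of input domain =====

-- B replaces A's line-by-line gather (build the transpose, then check rows, columns and
-- diagonals each with its own branch) with a single scatter pass over the grid's cells
-- that accumulates a sum and a completeness flag per constraint line (objective: alternative).

-- ===== PORT A =====
-- cell access arr[j][i] (exact for in-range indices; Pre_ keeps them in range)
def pvCell (arr : List (List (Option Int))) (j i : Int) : Option Int :=
  (PySem.List.pyGet? ((PySem.List.pyGet? arr j).getD []) i).join

def pvRow (arr : List (List (Option Int))) (i : Int) : List (Option Int) :=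
  (PySem.List.pyGet? arr i).getD []

-- Python sum(line); only consulted when the line contains no None, where .getD 0 is exact
def pvLineSum (line : List (Option Int)) : Int :=
  line.foldl (fun s x => s + x.getD 0) 0

def pvHasNone (line : List (Option Int)) : Bool :=
  line.contains none

-- literal port of A: build the transpose `columns` with the nested loop, then the
-- row loop with early return, then the six separate branch checks in A's order
def is_currently_valid (arr : List (List (Option Int))) : Bool :=
  let columns : List (List (Option Int)) :=
    (List.range arr.length).map (fun i =>
      (List.range ((arr.headD []).length)).map (fun j => pvCell arr (Int.ofNat j) (Int.ofNat i)))
  let c0 := (PySem.List.pyGet? columns 0).getD []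
  let c1 := (PySem.List.pyGet? columns 1).getD []
  let c2 := (PySem.List.pyGet? columns 2).getD []
  if !((List.range 3).all (fun i =>
        pvHasNone (pvRow arr (Int.ofNat i)) || pvLineSum (pvRow arr (Int.ofNat i)) == 15)) then false
  else if !pvHasNone c0 && pvLineSum c0 != 15 then false
  else if !pvHasNone c1 && pvLineSum c1 != 15 then false
  else if !pvHasNone c2 && pvLineSum c2 != 15 then false
  else if !pvHasNone [pvCell arr 0 0, pvCell arr 1 1, pvCell arr 2 2] &&
          pvLineSum [pvCell arr 0 0, pvCell arr 1 1, pvCell arr 2 2] != 15 then false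
  else if !pvHasNone [pvCell arr 0 2, pvCell arr 1 1, pvCell arr 2 0] &&
          ((pvCell arr 0 2).getD 0 + (pvCell arr 1 1).getD 0 + (pvCell arr 2 0).getD 0) != 15 then false
  else true

-- ===== PORT B =====
-- cell (i,j) belongs to lines: row i, column 3+j, main diagonal 6, anti-diagonal 7
def pvCellLines (i j : Nat) : List Nat :=
  [i, 3 + j] ++ (if i == j then [6] else []) ++ (if i + j == 2 then [7] else [])

-- scatter one cell's value into (sums, complete) at line id g
def pvScatter (v : Option Int) (st : List Int × List Bool) (g : Nat) : List Int × List Bool :=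
  match v with
  | none => (st.1, st.2.set g false)
  | some x => (st.1.set g (st.1.getD g 0 + x), st.2)

-- the inner loop of B: scatter the cells of one row (clipped to 3, as row[:3]) at row id i
def pvRowStep (i : Nat) (st : List Int × List Bool) (r : List (Option Int)) :
    List Int × List Bool :=
  (PySem.List.enumerate (r.take 3)).foldl (fun st jv =>
    (pvCellLines i jv.1.toNat).foldl (pvScatter jv.2) st) st

def is_currently_valid_alt (arr : List (List (Option Int))) : Bool :=
  let st :=
    (PySem.List.enumerate (arr.take 3)).foldl (fun st ir => pvRowStep ir.1.toNat st ir.2)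
      (List.replicate 8 (0 : Int), List.replicate 8 true)
  (List.range 8).all (fun g => !(st.2.getD g true) || st.1.getD g 0 == 15)

-- ===== PRECONDITION & SPEC =====
-- a row A's row loop passes over (None in row or sum(row) == 15)
def pvRowPass (r : List (Option Int)) : Prop := none ∈ r ∨ pvLineSum r = 15
-- a complete row that fails A's row check and whose first three cells also miss 15
def pvPrefBad (r : List (Option Int)) : Prop :=
  none ∉ r ∧ pvLineSum r ≠ 15 ∧ pvLineSum (r.take 3) ≠ 15
-- Pre_ is the function's natural domain, the 3×3 boards, plus the malformed boards on which
-- both programs still return the same early verdict False: A's column build succeeds and one of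
-- the first three rows is complete, misses sum 15 (A returns False there) and misses it on its
-- first three cells too (so B's row line also fails).  Excluded (A returns, B's value is its
-- clipped-grid verdict): the residual malformed boards where A returns by judging full-length
-- rows/columns of a board larger than 3×3, or where the bad row's 3-cell prefix happens to sum
-- to 15; on every other malformed shape A raises IndexError.
def Pre_is_currently_valid (arr : List (List (Option Int))) : Prop :=
  (arr.length = 3 ∧ ∀ row ∈ arr, row.length = 3) ∨
  ((arr.headD []).length ≤ arr.length ∧
   (∀ j < (arr.headD []).length, arr.length ≤ (arr.getD j []).length) ∧
   ((0 < arr.length ∧ pvPrefBad (arr.getD 0 [])) ∨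
    (1 < arr.length ∧ pvRowPass (arr.getD 0 []) ∧ pvPrefBad (arr.getD 1 [])) ∨
    (2 < arr.length ∧ pvRowPass (arr.getD 0 []) ∧ pvRowPass (arr.getD 1 []) ∧
       pvPrefBad (arr.getD 2 []))))
instance (arr : List (List (Option Int))) : Decidable (Pre_is_currently_valid arr) := by
  unfold Pre_is_currently_valid pvPrefBad pvRowPass; infer_instance

def pvWitness_is_currently_valid : List (List (Option Int)) :=
  [[some 2, some 7, some 6], [some 9, none, some 1], [some 4, some 3, some 8]]

def Spec_is_currently_valid (arr : List (List (Option Int))) (out : Bool) : Prop := out = is_currently_valid_alt arr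
instance (arr : List (List (Option Int))) (out : Bool) : Decidable (Spec_is_currently_valid arr out) := by unfold Spec_is_currently_valid; infer_instance

-- ===== CLAIM (what is proved, stated in full; the proofs are below) =====
def Claim_equal_is_currently_valid : Prop := ∀ (arr : List (List (Option Int))), Dom_is_currently_valid arr → Pre_is_currently_valid arr → Spec_is_currently_valid arr (is_currently_valid arr)

-- ===== LEMMAS AND PROOFS =====
-- scattering an explicit 0 changes nothing: the sum entry is rewritten to itself
theorem pad_id (st : List Int × List Bool) (g : Nat) : pvScatter (some 0) st g = st := by
  rcases st with ⟨s, fl⟩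
  by_cases h : g < s.length
  · simp [pvScatter, List.getD_eq_getElem?_getD, List.getElem?_eq_getElem h,
      List.set_getElem_self]
  · simp [pvScatter, List.set_eq_of_length_le (Nat.le_of_not_lt h), List.getD,
      List.getElem?_eq_none (Nat.le_of_not_lt h)]

-- a whole group list of 0-scatters is the identity
theorem foldl_pad (st : List Int × List Bool) (gs : List Nat) :
    gs.foldl (pvScatter (some 0)) st = st := by
  induction gs generalizing st with
  | nil => rfl
  | cons g gs ih => simp [pad_id, ih]

-- B treats a missing cell exactly like an explicit 0-valued cell
theorem rowStep_pad (i : Nat) (st : List Int × List Bool) (r : List (Option Int)) :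
    pvRowStep i st r =
      pvRowStep i st [r[0]?.getD (some 0), r[1]?.getD (some 0), r[2]?.getD (some 0)] := by
  rcases r with _ | ⟨a, _ | ⟨b, _ | ⟨c, rest⟩⟩⟩ <;>
    simp [pvRowStep, PySem.List.enumerate, foldl_pad]

-- a padded-out row of explicit 0s scatters nothing either
theorem rowStep_pad0 (i : Nat) (st : List Int × List Bool) :
    pvRowStep i st [some 0, some 0, some 0] = st := by
  simp [pvRowStep, PySem.List.enumerate, foldl_pad]

-- B's padded cell (i, j): missing rows/cells read as an explicit 0
def pvPad (arr : List (List (Option Int))) (i j : Nat) : Option Int :=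
  (arr.getD i []).getD j (some 0)

-- B on any board equals B on the board padded out to 3×3 with 0-valued cells
theorem alt_clip (arr : List (List (Option Int))) :
    is_currently_valid_alt arr =
    is_currently_valid_alt
      [[pvPad arr 0 0, pvPad arr 0 1, pvPad arr 0 2],
       [pvPad arr 1 0, pvPad arr 1 1, pvPad arr 1 2],
       [pvPad arr 2 0, pvPad arr 2 1, pvPad arr 2 2]] := by
  rcases arr with _ | ⟨r0, _ | ⟨r1, _ | ⟨r2, rest⟩⟩⟩ <;>
    simp [is_currently_valid_alt, PySem.List.enumerate, pvPad, rowStep_pad0,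
      ← rowStep_pad]

-- the verdict both programs pass on one 3-cell line, as a function of the cells
def chkLine (x y z : Option Int) : Bool :=
  !(x.isSome && y.isSome && z.isSome) || decide (0 + x.getD 0 + y.getD 0 + z.getD 0 = 15)

-- one scatter step, written uniformly in the cell value (no match left on v)
theorem scatter1 (v : Option Int) (s : List Int) (fl : List Bool) (g : Nat)
    (hs : g < s.length) (hf : g < fl.length) :
    pvScatter v (s, fl) g = (s.set g (s[g] + v.getD 0), fl.set g (fl[g] && v.isSome)) := by
  cases v <;>
    simp [pvScatter, List.set_getElem_self, List.getD_eq_getElem?_getD, List.getElem?_eq_getElem hs]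

theorem alt_eq_3x3 (a b c d e f g h i : Option Int) :
    is_currently_valid_alt [[a,b,c],[d,e,f],[g,h,i]] =
    (chkLine a b c && chkLine d e f && chkLine g h i &&
     chkLine a d g && chkLine b e h && chkLine c f i &&
     chkLine a e i && chkLine c e g) := by
  simp [is_currently_valid_alt, pvRowStep, pvCellLines, PySem.List.enumerate, List.range_succ,
    scatter1, chkLine, Bool.and_assoc, beq_eq_decide]

theorem chk3' (x y z : Option Int) :
    (pvHasNone [x,y,z] || decide (pvLineSum [x,y,z] = 15)) = chkLine x y z := by
  cases x <;> cases y <;> cases z <;> simp [pvHasNone, pvLineSum, chkLine]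

theorem chk3'' (x y z : Option Int) :
    (pvHasNone [x,y,z] || decide (x.getD 0 + y.getD 0 + z.getD 0 = 15)) = chkLine x y z := by
  cases x <;> cases y <;> cases z <;> simp [pvHasNone, chkLine]

theorem a_eq_3x3 (a b c d e f g h i : Option Int) :
    is_currently_valid [[a,b,c],[d,e,f],[g,h,i]] =
    (chkLine a b c && chkLine d e f && chkLine g h i &&
     chkLine a d g && chkLine b e h && chkLine c f i &&
     chkLine a e i && chkLine c e g) := by
  simp only [is_currently_valid, pvRow, pvCell, List.length_cons, List.length_nil,
    List.headD, List.range_succ, List.range_zero]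
  simp only [Int.ofNat_eq_natCast]
  simp [chk3', chk3'', Bool.and_assoc]

-- a complete row that misses 15 on its first three cells makes its padded line fail
theorem chk_pad_false (r : List (Option Int)) (h1 : none ∉ r) (h2 : pvLineSum (r.take 3) ≠ 15) :
    chkLine (r.getD 0 (some 0)) (r.getD 1 (some 0)) (r.getD 2 (some 0)) = false := by
  rcases r with _ | ⟨a, _ | ⟨b, _ | ⟨c, rest⟩⟩⟩ <;>
    (try simp_all [chkLine, pvLineSum, Option.isSome_iff_ne_none]) <;> tauto

-- B is false whenever some row i < 3 of the board is complete and its first three cells miss 15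
theorem B_false_of_prefbad (arr : List (List (Option Int))) (i : Nat) (hi : i < 3)
    (h1 : none ∉ arr.getD i []) (h2 : pvLineSum ((arr.getD i []).take 3) ≠ 15) :
    is_currently_valid_alt arr = false := by
  rw [alt_clip, alt_eq_3x3]
  have : chkLine (pvPad arr i 0) (pvPad arr i 1) (pvPad arr i 2) = false := by
    simpa [pvPad] using chk_pad_false (arr.getD i []) h1 h2
  interval_cases i <;> simp_all

-- A-side: a complete row missing 15 fails A's row check
theorem lineCheck_false {r : List (Option Int)} (h1 : none ∉ r) (h2 : pvLineSum r ≠ 15) :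
    (pvHasNone r || pvLineSum r == 15) = false := by
  simp [pvHasNone, List.contains_eq_mem, h1, h2]

theorem pvRow_eq_getD (arr : List (List (Option Int))) (i : Nat) (h : i < arr.length) :
    pvRow arr (Int.ofNat i) = arr.getD i [] := by
  simp [pvRow, PySem.List.pyGet?_natCast, List.getD]

theorem A_false_of_bad_row (arr : List (List (Option Int))) (i : Nat) (hi : i < 3)
    (h : (pvHasNone (pvRow arr (Int.ofNat i)) || pvLineSum (pvRow arr (Int.ofNat i)) == 15) = false) :
    is_currently_valid arr = false := by
  simp only [is_currently_valid]
  have hall : ((List.range 3).all (fun k =>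
      pvHasNone (pvRow arr (Int.ofNat k)) || pvLineSum (pvRow arr (Int.ofNat k)) == 15)) = false := by
    rw [List.all_eq_false]
    exact ⟨i, List.mem_range.mpr hi, by simpa using h⟩
  rw [hall]
  rfl

-- ===== VERDICT (by name: the statement is the Claim_ definition above) =====
theorem is_currently_valid_spec : Claim_equal_is_currently_valid := by
  intro arr _ hpre
  rcases hpre with ⟨hlen, hrows⟩ | ⟨_, _, hfail⟩
  · obtain ⟨r0, r1, r2, rfl⟩ := List.length_eq_three.mp hlen
    obtain ⟨a, b, c, h0⟩ := List.length_eq_three.mp (hrows r0 (by simp))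
    obtain ⟨d, e, f, h1⟩ := List.length_eq_three.mp (hrows r1 (by simp))
    obtain ⟨g, h, i, h2⟩ := List.length_eq_three.mp (hrows r2 (by simp))
    subst h0 h1 h2
    show is_currently_valid _ = is_currently_valid_alt _
    rw [a_eq_3x3, alt_eq_3x3]
  · show is_currently_valid arr = is_currently_valid_alt arr
    have key : ∃ i : Nat, i < 3 ∧ i < arr.length ∧ pvPrefBad (arr.getD i []) := by
      rcases hfail with ⟨hl, hbad⟩ | ⟨hl, _, hbad⟩ | ⟨hl, _, _, hbad⟩
      · exact ⟨0, by omega, hl, hbad⟩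
      · exact ⟨1, by omega, hl, hbad⟩
      · exact ⟨2, by omega, hl, hbad⟩
    obtain ⟨i, hi, hil, hnone, hsum, hpref⟩ := key
    have hA : is_currently_valid arr = false := by
      refine A_false_of_bad_row arr i hi ?_
      rw [pvRow_eq_getD arr i hil]
      exact lineCheck_false hnone hsum
    rw [hA, B_false_of_prefbad arr i hi hnone hpref]
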